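-- pv_equiv track=rewrite | github.com/koeppl/lz78flex | lz78.py | longest_timestamped_prefix_length
-- ===== SOURCE A (Python) =====
-- def longest_timestamped_prefix_length(dictionary, text, startposition) -> int:
-- 	""" find the longest prefix of text in dictionary """
-- 	prefix = ''
-- 	for char in text[startposition:]:
-- 		prefix += char
-- 		if prefix not in dictionary:
-- 			return len(prefix)-1
-- 		if dictionary[prefix][1] >= startposition:
-- 			return len(prefix)-1
-- 	return len(prefix)
-- ===== SOURCE B (Python) =====
-- def longest_timestamped_prefix_length(dictionary, text, startposition) -> int:
--     """ find the longest prefix of text in dictionary """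
--     suffix = text[startposition:]
--     good = {key for key, value in dictionary.items() if value[1] < startposition}
--     n = 0
--     while n < len(suffix) and suffix[:n + 1] in good:
--         n += 1
--     return n
-- ===== Notes on version B (the rewrite author's own statement) =====
-- stated objective: alternative
-- what changed: B pre-filters the dictionary once into the set of keys whose timestamp is below startposition and then counts matching prefix lengths with a slicing while-loop, instead of A's accumulate-a-prefix loop with two early-return branches and a per-step timestamp lookup.
import Mathlib
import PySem

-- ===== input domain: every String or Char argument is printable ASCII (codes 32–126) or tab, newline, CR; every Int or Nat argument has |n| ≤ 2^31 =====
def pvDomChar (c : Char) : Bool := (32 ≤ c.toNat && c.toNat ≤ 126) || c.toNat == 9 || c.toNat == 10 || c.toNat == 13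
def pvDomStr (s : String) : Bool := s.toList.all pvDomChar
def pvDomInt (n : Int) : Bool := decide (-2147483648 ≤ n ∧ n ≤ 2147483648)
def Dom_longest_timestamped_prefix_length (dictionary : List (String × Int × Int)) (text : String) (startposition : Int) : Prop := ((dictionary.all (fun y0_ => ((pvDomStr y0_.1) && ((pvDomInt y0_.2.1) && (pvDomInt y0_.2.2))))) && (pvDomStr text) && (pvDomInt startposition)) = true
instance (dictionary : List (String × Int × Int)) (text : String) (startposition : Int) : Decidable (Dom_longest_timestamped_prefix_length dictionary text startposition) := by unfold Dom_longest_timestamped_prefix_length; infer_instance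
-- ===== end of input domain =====

-- B filters the dictionary once into the set of keys usable at this position and then counts
-- matching prefix lengths by slicing in a while loop, instead of A's accumulate-and-early-return
-- loop with a per-step timestamp lookup (objective: alternative; same asymptotic cost).

-- ===== PORT A =====
-- the for-loop of A: `pre` is the accumulated prefix, the second list the remaining chars
def pvLoopA (d : PySem.Dict String (Int × Int)) (startposition : Int) :
    List Char → List Char → Int
  | pre, [] => (pre.length : Int)
  | pre, c :: rest =>
    let pre' := pre ++ [c]
    match d.get? (String.mk pre') with
    | none => (pre'.length : Int) - 1
    | some v => if v.2 ≥ startposition then (pre'.length : Int) - 1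
                else pvLoopA d startposition pre' rest

def longest_timestamped_prefix_length (dictionary : List (String × Int × Int)) (text : String) (startposition : Int) : Int :=
  pvLoopA (PySem.Dict.ofList dictionary) startposition []
    (PySem.List.slice text.toList (some startposition) none)

-- ===== PORT B =====
-- the while-loop of Source B: suffix[:n+1] is suffix.take (n+1) (PySem.List.slice_to_natCast)
def pvLoopB (good : List String) (suffix : List Char) (n : Nat) : Nat :=
  if h : n < suffix.length ∧ String.mk (suffix.take (n + 1)) ∈ good then
    pvLoopB good suffix (n + 1)
  else n
termination_by suffix.length - n
decreasing_by omega

def longest_timestamped_prefix_length_alt (dictionary : List (String × Int × Int)) (text : String) (startposition : Int) : Int :=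
  let suffix := PySem.List.slice text.toList (some startposition) none
  let good : List String := PySem.Set.ofList
    (((PySem.Dict.ofList dictionary).items.filter (fun p => decide (p.2.2 < startposition))).map (·.1))
  ((pvLoopB good suffix 0 : Nat) : Int)

-- ===== PRECONDITION & SPEC =====
def Spec_longest_timestamped_prefix_length (dictionary : List (String × Int × Int)) (text : String) (startposition : Int) (out : Int) : Prop := out = longest_timestamped_prefix_length_alt dictionary text startposition
instance (dictionary : List (String × Int × Int)) (text : String) (startposition : Int) (out : Int) : Decidable (Spec_longest_timestamped_prefix_length dictionary text startposition out) := by unfold Spec_longest_timestamped_prefix_length; infer_instance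

-- ===== CLAIM (what is proved, stated in full; the proofs are below) =====
def Claim_equal_longest_timestamped_prefix_length : Prop := ∀ (dictionary : List (String × Int × Int)) (text : String) (startposition : Int), Dom_longest_timestamped_prefix_length dictionary text startposition → Spec_longest_timestamped_prefix_length dictionary text startposition (longest_timestamped_prefix_length dictionary text startposition)

-- ===== LEMMAS AND PROOFS =====

-- membership in B's filtered key set = a successful, timestamp-admissible lookup in the dict
theorem pv_mem_good (d : PySem.Dict String (Int × Int)) (hnd : d.keys.Nodup) (s : Int) (k : String) :
    (k ∈ PySem.Set.ofList ((d.items.filter (fun p => decide (p.2.2 < s))).map (·.1))) ↔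
      ∃ v, d.get? k = some v ∧ v.2 < s := by
  rw [PySem.Set.mem_ofList]
  constructor
  · rintro h
    obtain ⟨p, hp, rfl⟩ := List.mem_map.mp h
    obtain ⟨hpi, hps⟩ := List.mem_filter.mp hp
    exact ⟨p.2, (PySem.Dict.get?_eq_some_iff_mem_items _ _ _ hnd).mpr hpi, by simpa using hps⟩
  · rintro ⟨v, hv, hs⟩
    exact List.mem_map.mpr ⟨(k, v), List.mem_filter.mpr
      ⟨(PySem.Dict.get?_eq_some_iff_mem_items _ _ _ hnd).mp hv, by simpa using hs⟩, rfl⟩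

theorem pv_loop_eq (d : PySem.Dict String (Int × Int)) (hnd : d.keys.Nodup) (s : Int)
    (suffix : List Char) (n : Nat) (hn : n ≤ suffix.length) :
    pvLoopA d s (suffix.take n) (suffix.drop n) =
      ((pvLoopB (PySem.Set.ofList ((d.items.filter (fun p => decide (p.2.2 < s))).map (·.1)))
          suffix n : Nat) : Int) := by
  set good := PySem.Set.ofList ((d.items.filter (fun p => decide (p.2.2 < s))).map (·.1)) with hg
  induction hk : suffix.length - n generalizing n with
  | zero =>
    have hlen : n = suffix.length := by omega
    subst hlen
    rw [List.drop_length, List.take_length, pvLoopB]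
    simp [pvLoopA]
  | succ m ih =>
    have hlt : n < suffix.length := by omega
    rw [List.drop_eq_getElem_cons hlt]
    have htake : suffix.take (n + 1) = suffix.take n ++ [suffix[n]] := by
      rw [List.take_succ]; simp [List.getElem?_eq_getElem hlt]
    rw [pvLoopB]
    simp only [pvLoopA, ← htake]
    have hmem := pv_mem_good d hnd s (String.mk (suffix.take (n + 1)))
    rw [← hg] at hmem
    cases hget : d.get? (String.mk (suffix.take (n + 1))) with
    | none =>
      have hnm : ¬ (String.mk (suffix.take (n + 1)) ∈ good) := by
        rw [hmem]; rintro ⟨v, hv, _⟩; simp [hget] at hv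
      rw [dif_neg (by tauto)]
      simp [List.length_take, Nat.min_eq_left (by omega : n + 1 ≤ suffix.length)]
    | some v =>
      by_cases hts : v.2 ≥ s
      · have hnm : ¬ (String.mk (suffix.take (n + 1)) ∈ good) := by
          rw [hmem]; rintro ⟨w, hw, hws⟩
          rw [hget] at hw; injection hw with hw; subst hw; omega
        dsimp only
        rw [if_pos hts, dif_neg (by tauto)]
        simp [List.length_take, Nat.min_eq_left (by omega : n + 1 ≤ suffix.length)]
      · have hm : String.mk (suffix.take (n + 1)) ∈ good := by
          rw [hmem]; exact ⟨v, hget, by omega⟩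
        dsimp only
        rw [if_neg hts, dif_pos ⟨hlt, hm⟩]
        have h2 : suffix.length - (n + 1) = m := by
          clear hmem hget hm hts htake
          omega
        exact ih (n + 1) hlt h2

-- ===== VERDICT (by name: the statement is the Claim_ definition above) =====
theorem longest_timestamped_prefix_length_spec : Claim_equal_longest_timestamped_prefix_length := by
  intro dictionary text startposition _
  unfold Spec_longest_timestamped_prefix_length longest_timestamped_prefix_length
    longest_timestamped_prefix_length_alt
  have h := pv_loop_eq (PySem.Dict.ofList dictionary) (PySem.Dict.nodup_keys_ofList dictionary)
    startposition (PySem.List.slice text.toList (some startposition) none) 0 (Nat.zero_le _)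
  simpa using h
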